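-- pv_equiv track=rewrite | github.com/albertwcheng/albert-bioinformatics-scripts | crossRepFormat2ebed.py | fromCrossesToEbedStruct
-- ===== SOURCE A (Python) =====
-- def fromCrossesToEbedStruct(cross):
-- 	gStart=-1
-- 	eStart=-1
--
-- 	blockStarts0=[]
-- 	blockSizes=[]
--
-- 	for i in range(0,len(cross)):
-- 		if cross[i] in ['>','<','x']:
-- 			if gStart==-1:
-- 				gStart=i
-- 			if eStart==-1:
-- 				eStart=i-gStart
-- 		else:
-- 			if eStart>=0:
-- 				blockStarts0.append(eStart)
-- 				blockSizes.append(i-eStart-gStart)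
-- 				eStart=-1
--
-- 	if eStart>=0:
-- 		blockStarts0.append(eStart)
-- 		blockSizes.append(len(cross)-eStart-gStart)
--
-- 	gend1=blockSizes[-1]+blockStarts0[-1]+gStart
--
-- 	return gStart,gend1,blockStarts0,blockSizes
-- ===== SOURCE B (Python) =====
-- def fromCrossesToEbedStruct(cross):
-- 	# build maximal marker runs back-to-front, merging with the following run
-- 	runs = []
-- 	for i in range(len(cross) - 1, -1, -1):
-- 		if cross[i] in '<>x':
-- 			if runs and runs[0][0] == i + 1:
-- 				runs[0] = (i, runs[0][1] + 1)
-- 			else: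
-- 				runs.insert(0, (i, 1))
-- 	gStart = runs[0][0] if runs else -1
-- 	blockStarts0 = [s - gStart for s, _ in runs]
-- 	blockSizes = [l for _, l in runs]
-- 	gend1 = blockSizes[-1] + blockStarts0[-1] + gStart
-- 	return gStart, gend1, blockStarts0, blockSizes
-- ===== Notes on version B (the rewrite author's own statement) =====
-- stated objective: alternative
-- what changed: A's forward state machine tracking gStart/eStart and flushing blocks on non-marker characters is replaced by a back-to-front pass that builds the list of maximal marker runs directly (merging a run with the following one) and then derives gStart, blockStarts0, blockSizes and gend1 from that run list.
import Mathlib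
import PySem

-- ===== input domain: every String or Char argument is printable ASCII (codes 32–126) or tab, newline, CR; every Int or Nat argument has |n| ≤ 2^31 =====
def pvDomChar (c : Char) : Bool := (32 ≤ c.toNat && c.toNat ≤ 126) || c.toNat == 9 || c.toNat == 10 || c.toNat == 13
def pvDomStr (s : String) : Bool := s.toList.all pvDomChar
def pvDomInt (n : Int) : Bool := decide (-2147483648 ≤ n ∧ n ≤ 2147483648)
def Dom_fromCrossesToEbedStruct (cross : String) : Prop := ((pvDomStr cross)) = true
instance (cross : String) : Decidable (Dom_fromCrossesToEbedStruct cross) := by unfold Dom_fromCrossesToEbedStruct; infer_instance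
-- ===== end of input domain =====

-- B replaces A's gStart/eStart state machine by a back-to-front single pass that builds the
-- list of maximal marker runs directly (objective: alternative, same O(n) cost).

-- ===== PORT A =====
def isMarker (c : Char) : Bool := c == '>' || c == '<' || c == 'x'

-- the for-loop of A: index i and the state (gStart, eStart, blockStarts0, blockSizes)
def loopA : List Char → Int → Int × Int × List Int × List Int → Int × Int × List Int × List Int
  | [], _, st => st
  | c :: rest, i, (g, e, bs, sz) =>
    if isMarker c then
      let g' := if g = -1 then i else g
      let e' := if e = -1 then i - g' else e
      loopA rest (i + 1) (g', e', bs, sz)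
    else
      if 0 ≤ e then loopA rest (i + 1) (g, -1, bs ++ [e], sz ++ [i - e - g])
      else loopA rest (i + 1) (g, e, bs, sz)

def fromCrossesToEbedStruct (cross : String) : Int × Int × List Int × List Int :=
  let l := cross.toList
  match loopA l 0 (-1, -1, [], []) with
  | (g, e, bs, sz) =>
    let bs := if 0 ≤ e then bs ++ [e] else bs
    let sz := if 0 ≤ e then sz ++ [(l.length : Int) - e - g] else sz
    -- blockSizes[-1] / blockStarts0[-1] raise IndexError when empty: excluded by Pre_
    let gend1 := (PySem.List.pyGet? sz (-1)).getD 0 + (PySem.List.pyGet? bs (-1)).getD 0 + g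
    (g, gend1, bs, sz)

-- ===== PORT B =====
-- Source B's reversed loop: recursion over the list, i the index of the head; runs[0]-merge
def runsB : List Char → Int → List (Int × Int)
  | [], _ => []
  | c :: rest, i =>
    let rs := runsB rest (i + 1)
    if isMarker c then
      match rs with
      | (s, k) :: tl => if s = i + 1 then (i, k + 1) :: tl else (i, 1) :: rs
      | [] => [(i, 1)]
    else rs

def fromCrossesToEbedStruct_alt (cross : String) : Int × Int × List Int × List Int :=
  let runs := runsB cross.toList 0
  let gStart : Int := match runs with | [] => -1 | (s, _) :: _ => s
  let blockStarts0 := runs.map (fun p => p.1 - gStart)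
  let blockSizes := runs.map (fun p => p.2)
  let gend1 := (PySem.List.pyGet? blockSizes (-1)).getD 0 + (PySem.List.pyGet? blockStarts0 (-1)).getD 0 + gStart
  (gStart, gend1, blockStarts0, blockSizes)

-- ===== PRECONDITION & SPEC =====
-- Pre_ excludes strings with no marker character, on which A raises IndexError (blockSizes[-1] of an empty list).
def Pre_fromCrossesToEbedStruct (cross : String) : Prop :=
  (cross.toList.any fun c => c == '>' || c == '<' || c == 'x') = true
instance (cross : String) : Decidable (Pre_fromCrossesToEbedStruct cross) := by unfold Pre_fromCrossesToEbedStruct; infer_instance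
def pvWitness_fromCrossesToEbedStruct : String := "ab<>x.x"

def Spec_fromCrossesToEbedStruct (cross : String) (out : Int × Int × List Int × List Int) : Prop := out = fromCrossesToEbedStruct_alt cross
instance (cross : String) (out : Int × Int × List Int × List Int) : Decidable (Spec_fromCrossesToEbedStruct cross out) := by unfold Spec_fromCrossesToEbedStruct; infer_instance

-- ===== CLAIM (what is proved, stated in full; the proofs are below) =====
def Claim_equal_fromCrossesToEbedStruct : Prop := ∀ (cross : String), Dom_fromCrossesToEbedStruct cross → Pre_fromCrossesToEbedStruct cross → Spec_fromCrossesToEbedStruct cross (fromCrossesToEbedStruct cross)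

-- ===== LEMMAS AND PROOFS =====

-- the end-of-loop flush of A, at total length N
def finA (N : Int) : Int × Int × List Int × List Int → Int × List Int × List Int
  | (g, e, bs, sz) => (g, if 0 ≤ e then bs ++ [e] else bs, if 0 ≤ e then sz ++ [N - e - g] else sz)

theorem runsB_start_ge : ∀ (l : List Char) (i : Int), ∀ p ∈ runsB l i, i ≤ p.1 := by
  intro l
  induction l with
  | nil => intro i p hp; simp [runsB] at hp
  | cons c rest ih =>
    intro i p hp
    rw [runsB] at hp
    by_cases hc : isMarker c = true
    · simp only [hc, if_true] at hp
      rcases hrs : runsB rest (i + 1) with _ | ⟨⟨s, k⟩, tl⟩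
      · rw [hrs] at hp
        simp at hp
        simp [hp]
      · rw [hrs] at hp
        dsimp only at hp
        split_ifs at hp with hs
        · rcases List.mem_cons.mp hp with h | h
          · simp [h]
          · have := ih (i + 1) p (by rw [hrs]; exact List.mem_cons_of_mem _ h); omega
        · rcases List.mem_cons.mp hp with h | h
          · simp [h]
          · have := ih (i + 1) p (by rw [hrs]; exact h); omega
    · simp only [hc, if_false, Bool.false_eq_true] at hp
      have := ih (i + 1) p hp; omega

theorem runsB_skip (c : Char) (rest : List Char) (i : Int) (hc : isMarker c = false) :
    runsB (c :: rest) i = runsB rest (i + 1) := by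
  simp [runsB, hc]

theorem dropWhile_cons_not {p : Char → Bool} {l r : List Char} {d : Char}
    (h : l.dropWhile p = d :: r) : p d = false := by
  have h1 : l.dropWhile p ≠ [] := by simp [h]
  have h2 := List.head_dropWhile_not p h1
  simpa [h] using h2

theorem tw_dw_length (p : Char → Bool) (l : List Char) :
    (l.takeWhile p).length + (l.dropWhile p).length = l.length := by
  induction l with
  | nil => rfl
  | cons c rest ih =>
    by_cases hc : p c = true
    · simp only [List.takeWhile_cons_of_pos hc, List.dropWhile_cons_of_pos hc, List.length_cons]
      omega
    · simp only [List.takeWhile_cons_of_neg hc, List.dropWhile_cons_of_neg hc,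
        List.length_nil, List.length_cons]
      omega

theorem runsB_run : ∀ (rest : List Char) (c : Char) (i : Int), isMarker c = true →
    runsB (c :: rest) i
      = (i, ((rest.takeWhile isMarker).length : Int) + 1)
        :: runsB (rest.dropWhile isMarker) (i + (rest.takeWhile isMarker).length + 1) := by
  intro rest
  induction rest with
  | nil => intro c i hc; simp [runsB, hc]
  | cons d rest' ih =>
    intro c i hc
    by_cases hd : isMarker d = true
    · rw [runsB]
      simp only [hc, if_true]
      rw [ih d (i + 1) hd]
      dsimp only
      rw [if_pos rfl]
      rw [List.takeWhile_cons_of_pos hd, List.dropWhile_cons_of_pos hd]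
      have h1 : ((rest'.takeWhile isMarker).length : Int) + 1 + 1
          = (((d :: rest'.takeWhile isMarker).length : Nat) : Int) + 1 := by
        simp only [List.length_cons]; push_cast; ring
      have h2 : i + 1 + ((rest'.takeWhile isMarker).length : Int) + 1
          = i + (((d :: rest'.takeWhile isMarker).length : Nat) : Int) + 1 := by
        simp only [List.length_cons]; push_cast; ring
      rw [h1, h2]
    · rw [runsB]
      simp only [hc, if_true, List.takeWhile_cons_of_neg hd,
        List.dropWhile_cons_of_neg hd, List.length_nil, Nat.cast_zero, add_zero, zero_add]
      rcases hrs : runsB (d :: rest') (i + 1) with _ | ⟨⟨s, k⟩, tl⟩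
      · simp
      · have hd' : isMarker d = false := by simpa using hd
        have hrs2 : runsB rest' (i + 1 + 1) = (s, k) :: tl := by
          rw [← runsB_skip d rest' (i + 1) hd']; exact hrs
        have hs := runsB_start_ge rest' (i + 1 + 1) (s, k) (by rw [hrs2]; exact List.mem_cons_self)
        have hne : ¬ s = i + 1 := by simp at hs; omega
        dsimp only
        rw [if_neg hne]

theorem loopA_consume : ∀ (l : List Char) (i g e : Int) (bs sz : List Int),
    ¬ g = -1 → ¬ e = -1 →
    loopA l i (g, e, bs, sz)
      = loopA (l.dropWhile isMarker) (i + (l.takeWhile isMarker).length) (g, e, bs, sz) := by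
  intro l
  induction l with
  | nil => intro i g e bs sz hg he; simp
  | cons c rest ih =>
    intro i g e bs sz hg he
    by_cases hc : isMarker c = true
    · rw [loopA]
      simp only [hc, if_true, hg, if_false, he]
      rw [ih (i + 1) g e bs sz hg he, List.takeWhile_cons_of_pos hc,
        List.dropWhile_cons_of_pos hc]
      congr 1
      simp only [List.length_cons]
      push_cast; ring
    · have hc' : isMarker c = false := by simpa using hc
      rw [List.takeWhile_cons_of_neg hc, List.dropWhile_cons_of_neg hc]
      simp

theorem loopA_idle : ∀ (n : Nat) (l : List Char) (i g : Int) (bs sz : List Int),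
    l.length = n → 0 ≤ g → g ≤ i →
    finA (i + l.length) (loopA l i (g, -1, bs, sz))
      = (g, bs ++ (runsB l i).map (fun p => p.1 - g), sz ++ (runsB l i).map (fun p => p.2)) := by
  intro n
  induction n using Nat.strong_induction_on with
  | _ n ih =>
    intro l i g bs sz hn hg hgi
    match l with
    | [] => simp [loopA, runsB, finA]
    | c :: rest =>
      by_cases hc : isMarker c = true
      · have hgne : ¬ g = -1 := by omega
        have hene : ¬ (i - g) = -1 := by omega
        have h0 : (0:Int) ≤ i - g := by omega
        have step1 : loopA (c :: rest) i (g, -1, bs, sz) = loopA rest (i + 1) (g, i - g, bs, sz) := by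
          rw [loopA]
          simp [hc, hgne]
        rw [step1, loopA_consume rest (i + 1) g (i - g) bs sz hgne hene]
        rcases hdw : rest.dropWhile isMarker with _ | ⟨d, rest'⟩
        · -- the run extends to the end of the string
          have htw := tw_dw_length isMarker rest
          rw [hdw] at htw
          simp only [List.length_nil, add_zero] at htw
          simp only [loopA, finA, if_pos h0]
          rw [runsB_run rest c i hc, hdw]
          have harith : i + (((c :: rest).length : Nat) : Int) - (i - g) - g
              = ((rest.takeWhile isMarker).length : Int) + 1 := by
            simp only [List.length_cons]; push_cast; omega
          rw [harith]
          simp [runsB]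
        · have hd' : isMarker d = false := dropWhile_cons_not hdw
          have hdn : ¬ isMarker d = true := by simp [hd']
          have htw := tw_dw_length isMarker rest
          rw [hdw] at htw
          simp only [List.length_cons] at htw
          have step2 : loopA (d :: rest') (i + 1 + ((rest.takeWhile isMarker).length : Int)) (g, i - g, bs, sz)
              = loopA rest' (i + 1 + ((rest.takeWhile isMarker).length : Int) + 1)
                  (g, -1, bs ++ [i - g], sz ++ [i + 1 + ((rest.takeWhile isMarker).length : Int) - (i - g) - g]) := by
            rw [loopA]
            simp [hdn]
            intro hlt
            exact absurd hlt (by omega)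
          have step3 : loopA (d :: rest') (i + 1 + ((rest.takeWhile isMarker).length : Int))
                  (g, -1, bs ++ [i - g], sz ++ [i + 1 + ((rest.takeWhile isMarker).length : Int) - (i - g) - g])
              = loopA rest' (i + 1 + ((rest.takeWhile isMarker).length : Int) + 1)
                  (g, -1, bs ++ [i - g], sz ++ [i + 1 + ((rest.takeWhile isMarker).length : Int) - (i - g) - g]) := by
            rw [loopA]
            simp [hdn]
          rw [show i + 1 + ((rest.takeWhile isMarker).length : Int)
                = i + ((rest.takeWhile isMarker).length : Int) + 1 by ring] at step2 step3 ⊢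
          rw [step2, ← step3]
          have hlen : (d :: rest').length < n := by
            simp only [List.length_cons] at hn ⊢
            omega
          have ihres := ih (d :: rest').length hlen (d :: rest') (i + ((rest.takeWhile isMarker).length : Int) + 1) g
            (bs ++ [i - g]) (sz ++ [i + ((rest.takeWhile isMarker).length : Int) + 1 - (i - g) - g]) rfl hg (by omega)
          have hN : i + ((rest.takeWhile isMarker).length : Int) + 1 + (((d :: rest').length : Nat) : Int)
              = i + (((c :: rest).length : Nat) : Int) := by
            simp only [List.length_cons]
            push_cast
            omega
          rw [hN] at ihres
          rw [ihres, runsB_run rest c i hc, hdw]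
          simp only [List.map_cons, Prod.mk.injEq, List.append_assoc]
          refine ⟨trivial, ?_, ?_⟩
          · simp
          · have harith : i + ((rest.takeWhile isMarker).length : Int) + 1 - (i - g) - g
                = ((rest.takeWhile isMarker).length : Int) + 1 := by omega
            rw [harith]
            simp
      · have hc' : isMarker c = false := by simpa using hc
        have h1 : loopA (c :: rest) i (g, -1, bs, sz) = loopA rest (i + 1) (g, -1, bs, sz) := by
          rw [loopA]
          simp [hc']
        have hN : i + (((c :: rest).length : Nat) : Int) = (i + 1) + (rest.length : Int) := by
          simp only [List.length_cons]; push_cast; ring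
        rw [h1, hN, ih rest.length (by omega) rest (i + 1) g bs sz rfl hg (by omega),
          runsB_skip c rest i hc']

theorem loopA_top : ∀ (l : List Char) (i : Int), 0 ≤ i →
    finA (i + l.length) (loopA l i (-1, -1, [], []))
      = (match runsB l i with
         | [] => (-1, ([] : List Int), ([] : List Int))
         | (s, _) :: _ => (s, (runsB l i).map (fun p => p.1 - s), (runsB l i).map (fun p => p.2))) := by
  intro l
  induction l with
  | nil => intro i hi; simp [loopA, runsB, finA]
  | cons c rest ih =>
    intro i hi
    by_cases hc : isMarker c = true
    · have h1 : loopA (c :: rest) i (-1, -1, [], []) = loopA rest (i + 1) (i, i - i, [], []) := by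
        rw [loopA]
        simp [hc]
      have h2 : loopA (c :: rest) i (i, -1, [], []) = loopA rest (i + 1) (i, i - i, [], []) := by
        rw [loopA]
        simp [hc]
      have hidle := loopA_idle (c :: rest).length (c :: rest) i i [] [] rfl hi le_rfl
      rw [h1, ← h2, hidle, runsB_run rest c i hc]
      simp
    · have hc' : isMarker c = false := by simpa using hc
      have h1 : loopA (c :: rest) i (-1, -1, [], []) = loopA rest (i + 1) (-1, -1, [], []) := by
        rw [loopA]
        simp [hc']
      have hN : i + (((c :: rest).length : Nat) : Int) = (i + 1) + (rest.length : Int) := by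
        simp only [List.length_cons]; push_cast; ring
      rw [h1, hN, ih (i + 1) (by omega), runsB_skip c rest i hc']

-- ===== VERDICT (by name: the statement is the Claim_ definition above) =====
theorem fromCrossesToEbedStruct_spec : Claim_equal_fromCrossesToEbedStruct := by
  intro cross _ _
  unfold Spec_fromCrossesToEbedStruct fromCrossesToEbedStruct fromCrossesToEbedStruct_alt
  dsimp only
  have htop := loopA_top cross.toList 0 le_rfl
  rcases hA : loopA cross.toList 0 (-1, -1, [], []) with ⟨g, e, bs, sz⟩
  rw [hA] at htop
  rcases hr : runsB cross.toList 0 with _ | ⟨⟨s, k⟩, rs⟩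
  · rw [hr] at htop
    simp only [finA, Prod.mk.injEq, zero_add] at htop
    obtain ⟨h1, h2, h3⟩ := htop
    dsimp only
    rw [h2, h3, h1]
    all_goals simp
  · rw [hr] at htop
    simp only [finA, Prod.mk.injEq, zero_add] at htop
    obtain ⟨h1, h2, h3⟩ := htop
    dsimp only
    rw [h2, h3, h1]
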